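-- pv_equiv track=rewrite | github.com/surya-apzzo/fixerflip-ai | app/engine/renovation_engine/renovation_cost_engine.py | _map_selected_elements_to_scope
-- ===== SOURCE A (Python) =====
-- from typing import List, Literal, Tuple
--
-- _SELECTED_ELEMENT_TO_COST_CATEGORY: dict[str, str] = {
--     "flooring": "flooring",
--     "paint": "paint",
--     "kitchen": "kitchen",
--     "bathroom": "bathroom",
--     "windows": "window",
--     "doors": "doors",
--     "lighting": "electrical",
-- }
--
-- def _map_selected_elements_to_scope(renovation_elements: List[str]) -> list[str]:
--     categories: list[str] = []
--     seen: set[str] = set()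
--     for raw in renovation_elements or []:
--         key = (raw or "").strip().lower()
--         mapped = _SELECTED_ELEMENT_TO_COST_CATEGORY.get(key)
--         if not mapped or mapped in seen:
--             continue
--         seen.add(mapped)
--         categories.append(mapped)
--     return categories
-- ===== SOURCE B (Python) =====
-- _SELECTED_ELEMENT_TO_COST_CATEGORY: dict[str, str] = {
--     "flooring": "flooring",
--     "paint": "paint",
--     "kitchen": "kitchen",
--     "bathroom": "bathroom",
--     "windows": "window",
--     "doors": "doors",
--     "lighting": "electrical",
-- }
--
-- def _map_selected_elements_to_scope(renovation_elements):
--     # Build the answer back-to-front: walk the input in REVERSE, prepend each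
--     # mapped category and purge any duplicate of it from the suffix already built.
--     # The first occurrence of a category always ends up in front, so the result
--     # is the first-occurrence-ordered dedup -- no 'seen' set is ever maintained.
--     result = []
--     for raw in reversed(renovation_elements or []):
--         m = _SELECTED_ELEMENT_TO_COST_CATEGORY.get((raw or "").strip().lower())
--         if m:
--             result = [m] + [c for c in result if c != m]
--     return result
-- ===== Notes on version B (the rewrite author's own statement) =====
-- stated objective: alternative
-- what changed: Instead of a forward pass with a 'seen' set guarding appends, B traverses the input in reverse and builds the answer back-to-front, prepending each mapped category and purging its duplicates from the already-built suffix; no membership set is maintained.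
import Mathlib
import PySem

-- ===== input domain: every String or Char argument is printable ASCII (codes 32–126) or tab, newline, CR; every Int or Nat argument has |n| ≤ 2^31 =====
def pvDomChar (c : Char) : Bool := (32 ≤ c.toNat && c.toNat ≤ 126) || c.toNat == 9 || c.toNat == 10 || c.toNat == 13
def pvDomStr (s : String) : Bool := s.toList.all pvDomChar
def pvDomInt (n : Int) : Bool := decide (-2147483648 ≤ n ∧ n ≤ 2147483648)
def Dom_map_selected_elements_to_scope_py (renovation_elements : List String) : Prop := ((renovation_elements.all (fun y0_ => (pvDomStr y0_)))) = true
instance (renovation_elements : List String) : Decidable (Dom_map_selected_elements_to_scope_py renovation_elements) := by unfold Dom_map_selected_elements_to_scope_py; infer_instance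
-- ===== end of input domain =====

-- B replaces A's forward pass with a 'seen' set by a reverse traversal that builds the answer
-- back-to-front, prepending each mapped category and purging its duplicates from the suffix:
-- an alternative decomposition with no membership set, same practical cost.


-- ===== PORT A =====
-- module constant _SELECTED_ELEMENT_TO_COST_CATEGORY
def pvCostTable : PySem.Dict String String := PySem.Dict.ofList
  [("flooring", "flooring"), ("paint", "paint"), ("kitchen", "kitchen"),
   ("bathroom", "bathroom"), ("windows", "window"), ("doors", "doors"),
   ("lighting", "electrical")]

-- key = (raw or "").strip().lower(); (raw or "") = raw for strings ("" stays "")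
def pvKey (raw : String) : String := PySem.Str.lower (PySem.Str.strip raw)

-- one loop step of A: mapped = table.get(key); 'if not mapped or mapped in seen: continue'.
-- A missing key (Python None) is encoded as "": None and "" are exactly Python's falsy strings here,
-- so 'not mapped' is m == "" — exact on every input.
def pvStepA (st : List String × PySem.Set String) (raw : String) : List String × PySem.Set String :=
  let m := (pvCostTable.get? (pvKey raw)).getD ""
  if m == "" || PySem.Set.contains st.2 m then st
  else (st.1 ++ [m], PySem.Set.add st.2 m)

def map_selected_elements_to_scope_py (renovation_elements : List String) : List String :=
  (renovation_elements.foldl pvStepA ([], PySem.Set.empty)).1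

-- ===== PORT B =====
-- 'm = table.get(key)' with the same "" encoding of None; 'if m:' is the some-case
def pvMapB (raw : String) : Option String :=
  let m := (pvCostTable.get? (pvKey raw)).getD ""
  if m == "" then none else some m

-- one step of B's loop: result = [m] + [c for c in result if c != m]
def pvStepB (result : List String) (raw : String) : List String :=
  match pvMapB raw with
  | none => result
  | some m => m :: result.filter (fun c => c != m)

def map_selected_elements_to_scope_py_alt (renovation_elements : List String) : List String :=
  (renovation_elements.reverse).foldl pvStepB []   -- for raw in reversed(…)

-- ===== PRECONDITION & SPEC =====
def Spec_map_selected_elements_to_scope_py (renovation_elements : List String) (out : List String) : Prop := out = map_selected_elements_to_scope_py_alt renovation_elements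
instance (renovation_elements : List String) (out : List String) : Decidable (Spec_map_selected_elements_to_scope_py renovation_elements out) := by unfold Spec_map_selected_elements_to_scope_py; infer_instance

-- ===== CLAIM =====
def Claim_equal_map_selected_elements_to_scope_py : Prop := ∀ (renovation_elements : List String), Dom_map_selected_elements_to_scope_py renovation_elements → Spec_map_selected_elements_to_scope_py renovation_elements (map_selected_elements_to_scope_py renovation_elements)

-- ===== LEMMAS AND PROOFS =====
-- the first-occurrence dedup, structurally
def pvDedupR : List String → List String
  | [] => []
  | m :: t => m :: (pvDedupR t).filter (fun c => c != m)

-- A-side invariant: A's fold computes the Set.add-fold of the filterMapped categories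
lemma pvLoopA_eq (xs : List String) : ∀ s : PySem.Set String,
    xs.foldl pvStepA (s, s)
      = ((xs.filterMap pvMapB).foldl PySem.Set.add s,
         (xs.filterMap pvMapB).foldl PySem.Set.add s) := by
  induction xs with
  | nil => intro s; rfl
  | cons raw rest ih =>
    intro s
    rw [List.foldl_cons, List.filterMap_cons]
    unfold pvStepA pvMapB
    generalize (pvCostTable.get? (pvKey raw)).getD "" = m
    by_cases hm : m = ""
    · simp only [hm, beq_self_eq_true, Bool.true_or, if_pos]
      exact ih s
    · have hbeq : (m == "") = false := beq_eq_false_iff_ne.mpr hm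
      by_cases hc : PySem.Set.contains s m = true
      · have hadd : PySem.Set.add s m = s := by unfold PySem.Set.add; rw [hc]; rfl
        simp only [hbeq, hc, Bool.false_or, if_pos, if_neg, Bool.false_eq_true,
          not_false_eq_true, List.foldl_cons, hadd]
        exact ih s
      · have hcf : PySem.Set.contains s m = false := by simpa using hc
        have hadd : PySem.Set.add s m = s ++ [m] := by unfold PySem.Set.add; rw [hcf]; rfl
        simp only [hbeq, hcf, Bool.false_or, Bool.false_eq_true, if_neg,
          not_false_eq_true, List.foldl_cons, ← hadd]
        exact ih (PySem.Set.add s m)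

-- the Set.add fold is s ++ (first-occurrence dedup, minus what s already holds)
lemma pvFoldAdd_eq (ys : List String) : ∀ s : PySem.Set String,
    ys.foldl PySem.Set.add s = s ++ (pvDedupR ys).filter (fun m => !(PySem.Set.contains s m)) := by
  induction ys with
  | nil => intro s; simp [pvDedupR]
  | cons m t ih =>
    intro s
    rw [List.foldl_cons]
    by_cases hc : PySem.Set.contains s m = true
    · have hadd : PySem.Set.add s m = s := by unfold PySem.Set.add; rw [hc]; rfl
      rw [hadd, ih s, pvDedupR]
      congr 1
      rw [List.filter_cons]
      simp only [hc, Bool.not_true, Bool.false_eq_true, if_neg, not_false_eq_true]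
      rw [List.filter_filter]
      refine List.filter_congr ?_
      intro c _
      by_cases hcm : c = m
      · subst hcm; simp [List.mem_of_elem_eq_true hc]
      · simp [hcm]
    · have hcf : PySem.Set.contains s m = false := by simpa using hc
      have hadd : PySem.Set.add s m = s ++ [m] := by unfold PySem.Set.add; rw [hcf]; rfl
      rw [hadd, ih (s ++ [m]), pvDedupR]
      have hcontApp : ∀ c, PySem.Set.contains (s ++ [m]) c
          = (PySem.Set.contains s c || (c == m)) := by
        intro c
        show List.contains (s ++ [m]) c = (List.contains s c || (c == m))
        by_cases h : c = m <;> simp [h]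
      rw [List.filter_cons]
      simp only [hcf, Bool.not_false, if_pos]
      rw [List.append_assoc]
      congr 1
      rw [List.singleton_append]
      congr 1
      rw [List.filter_filter]
      refine List.filter_congr ?_
      intro c _
      rw [hcontApp c]
      by_cases hcm : c = m
      · subst hcm; simp
      · have : (c == m) = false := beq_eq_false_iff_ne.mpr hcm
        simp [this, hcm]

-- B's reversed fold computes the structural first-occurrence dedup of the mapped categories
lemma pvLoopB_eq (xs : List String) :
    (xs.reverse).foldl pvStepB [] = pvDedupR (xs.filterMap pvMapB) := by
  induction xs with
  | nil => rfl
  | cons raw rest ih =>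
    rw [List.reverse_cons, List.foldl_append, ih, List.filterMap_cons,
      List.foldl_cons, List.foldl_nil]
    unfold pvStepB
    cases h : pvMapB raw with
    | none => rfl
    | some m => rfl

-- ===== VERDICT =====
theorem map_selected_elements_to_scope_py_spec : Claim_equal_map_selected_elements_to_scope_py := by
  intro xs _
  unfold Spec_map_selected_elements_to_scope_py
  unfold map_selected_elements_to_scope_py map_selected_elements_to_scope_py_alt
  rw [pvLoopB_eq]
  have e : ([] : List String) = (PySem.Set.empty : PySem.Set String) := rfl
  rw [e]
  have hA := congrArg Prod.fst (pvLoopA_eq xs PySem.Set.empty)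
  rw [hA, pvFoldAdd_eq]
  simp [PySem.Set.empty, PySem.Set.contains]
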